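-- pv_equiv track=rewrite | github.com/Soham0047/AegisCI | ml/data_pipeline.py | _matches_allowlist
-- ===== SOURCE A (Python) =====
-- def _matches_allowlist(value: str, allowlist: set[str]) -> bool:
--     if not allowlist:
--         return True
--     for entry in allowlist:
--         if entry.endswith("*"):
--             if value.startswith(entry[:-1]):
--                 return True
--         elif value == entry:
--             return True
--     return False
-- ===== SOURCE B (Python) =====
-- def _matches_allowlist(value: str, allowlist: set[str]) -> bool:
--     if not allowlist:
--         return True
--     exact = set()
--     wild = set()
--     for e in allowlist:
--         if e.endswith("*"):
--             wild.add(e[:-1])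
--         else:
--             exact.add(e)
--     if value in exact:
--         return True
--     lens = {len(p) for p in wild}
--     return any(value[:L] in wild for L in lens)
-- ===== Notes on version B (the rewrite author's own statement) =====
-- stated objective: alternative
-- what changed: Inverts the wildcard check: builds a hash set of wildcard prefixes and the set of their lengths, then tests whether the value's prefix of each occurring length is in the prefix set, instead of scanning allowlist entries and calling startswith per entry.
import Mathlib
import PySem

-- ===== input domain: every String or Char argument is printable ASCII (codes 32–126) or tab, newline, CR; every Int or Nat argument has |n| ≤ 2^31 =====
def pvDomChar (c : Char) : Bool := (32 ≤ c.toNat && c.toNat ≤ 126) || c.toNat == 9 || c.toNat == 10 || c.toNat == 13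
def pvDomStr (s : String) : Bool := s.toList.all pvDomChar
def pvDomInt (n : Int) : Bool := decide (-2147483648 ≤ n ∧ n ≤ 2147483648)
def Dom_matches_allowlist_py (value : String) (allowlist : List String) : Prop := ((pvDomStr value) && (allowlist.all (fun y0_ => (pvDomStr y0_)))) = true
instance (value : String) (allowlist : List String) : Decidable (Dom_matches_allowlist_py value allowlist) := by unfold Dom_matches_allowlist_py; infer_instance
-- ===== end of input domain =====

-- B inverts the wildcard check: it builds a set of wildcard prefixes and the set of their
-- lengths, then tests the value's prefix of each occurring length for set membership; same
-- result, a different traversal (over prefix lengths of the value, not per allowlist entry).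

-- ===== PORT A =====
-- the 'for entry in allowlist: …' loop with its two early returns
def pvLoopA (value : String) : List String → Bool
  | [] => false
  | entry :: rest =>
    if PySem.Str.endswith entry "*" then
      if PySem.Str.startswith value (PySem.Str.slice entry none (some (-1))) then true
      else pvLoopA value rest
    else if value == entry then true
    else pvLoopA value rest

def matches_allowlist_py (value : String) (allowlist : List String) : Bool :=
  if allowlist.isEmpty then true
  else pvLoopA value allowlist

-- ===== PORT B =====
-- the 'for e in allowlist: …' loop filling the two sets
def pvFillB : List String → PySem.Set String × PySem.Set String → PySem.Set String × PySem.Set String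
  | [], st => st
  | e :: rest, st =>
    if PySem.Str.endswith e "*" then
      pvFillB rest (st.1, PySem.Set.add st.2 (PySem.Str.slice e none (some (-1))))
    else
      pvFillB rest (PySem.Set.add st.1 e, st.2)

def matches_allowlist_py_alt (value : String) (allowlist : List String) : Bool :=
  if allowlist.isEmpty then true
  else
    let st := pvFillB allowlist (PySem.Set.empty, PySem.Set.empty)
    if PySem.Set.contains st.1 value then true
    else
      let lens : PySem.Set Int := PySem.Set.ofList (st.2.map (fun p => (PySem.Str.len p : Int)))
      lens.any (fun L => PySem.Set.contains st.2 (PySem.Str.slice value none (some L)))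

-- ===== PRECONDITION & SPEC =====
def Spec_matches_allowlist_py (value : String) (allowlist : List String) (out : Bool) : Prop := out = matches_allowlist_py_alt value allowlist
instance (value : String) (allowlist : List String) (out : Bool) : Decidable (Spec_matches_allowlist_py value allowlist out) := by unfold Spec_matches_allowlist_py; infer_instance

-- ===== CLAIM (what is proved, stated in full; the proofs are below) =====
def Claim_equal_matches_allowlist_py : Prop := ∀ (value : String) (allowlist : List String), Dom_matches_allowlist_py value allowlist → Spec_matches_allowlist_py value allowlist (matches_allowlist_py value allowlist)

-- ===== LEMMAS AND PROOFS =====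

-- A's loop holds iff some entry matches (wildcard-prefix or exact)
lemma pvLoopA_iff (value : String) (l : List String) :
    pvLoopA value l = true ↔
      ∃ e ∈ l, (PySem.Str.endswith e "*" = true ∧
                  PySem.Str.startswith value (PySem.Str.slice e none (some (-1))) = true) ∨
               (PySem.Str.endswith e "*" = false ∧ value = e) := by
  induction l with
  | nil => simp [pvLoopA]
  | cons e rest ih =>
    simp only [pvLoopA, List.mem_cons]
    by_cases h1 : PySem.Str.endswith e "*" = true
    · rw [if_pos h1]
      by_cases h2 : PySem.Str.startswith value (PySem.Str.slice e none (some (-1))) = true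
      · rw [if_pos h2]
        exact ⟨fun _ => ⟨e, Or.inl rfl, Or.inl ⟨h1, h2⟩⟩, fun _ => rfl⟩
      · rw [if_neg h2, ih]
        constructor
        · rintro ⟨x, hx, hor⟩; exact ⟨x, Or.inr hx, hor⟩
        · rintro ⟨x, hx, hor⟩
          rcases hx with rfl | hx
          · rcases hor with ⟨_, hs⟩ | ⟨hne, _⟩
            · exact absurd hs h2
            · rw [h1] at hne; cases hne
          · exact ⟨x, hx, hor⟩
    · have h1' : PySem.Str.endswith e "*" = false := by
        cases h : PySem.Str.endswith e "*" <;> simp_all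
      rw [if_neg h1]
      by_cases h2 : (value == e) = true
      · rw [if_pos h2]
        exact ⟨fun _ => ⟨e, Or.inl rfl, Or.inr ⟨h1', eq_of_beq h2⟩⟩, fun _ => rfl⟩
      · rw [if_neg h2, ih]
        constructor
        · rintro ⟨x, hx, hor⟩; exact ⟨x, Or.inr hx, hor⟩
        · rintro ⟨x, hx, hor⟩
          rcases hx with rfl | hx
          · rcases hor with ⟨hw, _⟩ | ⟨_, hv⟩
            · rw [h1'] at hw; cases hw
            · exact absurd (beq_iff_eq.mpr hv) h2
          · exact ⟨x, hx, hor⟩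

-- membership in the two sets built by B's fill loop
lemma pvFillB_mem (l : List String) (st : PySem.Set String × PySem.Set String) (x : String) :
    ((x ∈ (pvFillB l st).1 ↔ x ∈ st.1 ∨ ∃ e ∈ l, PySem.Str.endswith e "*" = false ∧ e = x) ∧
     (x ∈ (pvFillB l st).2 ↔ x ∈ st.2 ∨ ∃ e ∈ l, PySem.Str.endswith e "*" = true ∧
        PySem.Str.slice e none (some (-1)) = x)) := by
  induction l generalizing st with
  | nil => simp [pvFillB]
  | cons e rest ih =>
    simp only [pvFillB]
    by_cases h1 : PySem.Str.endswith e "*" = true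
    · rw [if_pos h1]
      rcases ih ((st.1, PySem.Set.add st.2 (PySem.Str.slice e none (some (-1))))) with ⟨ihe, ihw⟩
      constructor
      · rw [ihe]
        simp only [List.mem_cons]
        constructor
        · rintro (h | ⟨y, hy, hp⟩)
          · exact Or.inl h
          · exact Or.inr ⟨y, Or.inr hy, hp⟩
        · rintro (h | ⟨y, (rfl | hy), hp⟩)
          · exact Or.inl h
          · rw [h1] at hp; simp at hp
          · exact Or.inr ⟨y, hy, hp⟩
      · rw [ihw]
        simp only [PySem.Set.mem_add, List.mem_cons]
        constructor
        · rintro ((h | rfl) | ⟨y, hy, hp⟩)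
          · exact Or.inl h
          · exact Or.inr ⟨e, Or.inl rfl, h1, rfl⟩
          · exact Or.inr ⟨y, Or.inr hy, hp⟩
        · rintro (h | ⟨y, (rfl | hy), hp⟩)
          · exact Or.inl (Or.inl h)
          · exact Or.inl (Or.inr hp.2.symm)
          · exact Or.inr ⟨y, hy, hp⟩
    · have h1' : PySem.Str.endswith e "*" = false := by
        cases h : PySem.Str.endswith e "*" <;> simp_all
      rw [if_neg h1]
      rcases ih ((PySem.Set.add st.1 e, st.2)) with ⟨ihe, ihw⟩
      constructor
      · rw [ihe]
        simp only [PySem.Set.mem_add, List.mem_cons]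
        constructor
        · rintro ((h | rfl) | ⟨y, hy, hp⟩)
          · exact Or.inl h
          · exact Or.inr ⟨_, Or.inl rfl, h1', rfl⟩
          · exact Or.inr ⟨y, Or.inr hy, hp⟩
        · rintro (h | ⟨y, (rfl | hy), hp⟩)
          · exact Or.inl (Or.inl h)
          · exact Or.inl (Or.inr hp.2.symm)
          · exact Or.inr ⟨y, hy, hp⟩
      · rw [ihw]
        simp only [List.mem_cons]
        constructor
        · rintro (h | ⟨y, hy, hp⟩)
          · exact Or.inl h
          · exact Or.inr ⟨y, Or.inr hy, hp⟩
        · rintro (h | ⟨y, (rfl | hy), hp⟩)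
          · exact Or.inl h
          · rw [h1'] at hp; simp at hp
          · exact Or.inr ⟨y, hy, hp⟩

-- if p is a prefix of value then value[:len(p)] = p
lemma startswith_slice_len (value p : String)
    (h : PySem.Str.startswith value p = true) :
    PySem.Str.slice value none (some (PySem.Str.len p : Int)) = p := by
  rw [PySem.Str.startswith_eq, PySem.Chars.startswith_iff] at h
  apply String.toList_inj.mp
  rw [PySem.Str.toList_slice, PySem.Chars.slice_eq_listSlice]
  have hlen : (PySem.Str.len p : Int) = (p.toList.length : Int) := by simp
  rw [hlen, PySem.List.slice_to_natCast]
  exact (List.prefix_iff_eq_take.mp h).symm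

-- any nonneg-length slice value[:L] is a prefix of value
lemma slice_startswith (value : String) (L : Int) (h0 : 0 ≤ L) :
    PySem.Str.startswith value (PySem.Str.slice value none (some L)) = true := by
  rw [PySem.Str.startswith_eq, PySem.Chars.startswith_iff]
  have ht : (PySem.Str.slice value none (some L)).toList = value.toList.take L.toNat := by
    rw [PySem.Str.toList_slice, PySem.Chars.slice_eq_listSlice, PySem.List.slice_to _ h0]
  rw [ht]
  exact List.take_prefix _ _

-- Set.contains is membership
lemma pv_contains_iff (s : PySem.Set String) (x : String) :
    PySem.Set.contains s x = true ↔ x ∈ s := by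
  simp [PySem.Set.contains]

-- ===== VERDICT (by name: the statement is the Claim_ definition above) =====
theorem matches_allowlist_py_spec : Claim_equal_matches_allowlist_py := by
  intro value l _
  unfold Spec_matches_allowlist_py matches_allowlist_py matches_allowlist_py_alt
  by_cases h : l.isEmpty
  · rw [if_pos h, if_pos h]
  · rw [if_neg h, if_neg h]
    rw [Bool.eq_iff_iff, pvLoopA_iff]
    have hsplit : ∀ (c b : Bool), ((if c = true then true else b) = true ↔ c = true ∨ b = true) := by
      intro c b; cases c <;> simp
    rw [hsplit]
    rw [pv_contains_iff, List.any_eq_true]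
    have hmem := fun x => pvFillB_mem l (PySem.Set.empty, PySem.Set.empty) x
    constructor
    · rintro ⟨e, he, ⟨hw, hs⟩ | ⟨hx, hv⟩⟩
      · set p := PySem.Str.slice e none (some (-1)) with hp
        have hpw : p ∈ (pvFillB l (PySem.Set.empty, PySem.Set.empty)).2 :=
          (hmem p).2.mpr (Or.inr ⟨e, he, hw, rfl⟩)
        refine Or.inr ⟨(PySem.Str.len p : Int), ?_, ?_⟩
        · simp only [PySem.Set.mem_ofList, List.mem_map]
          exact ⟨p, hpw, rfl⟩
        · rw [pv_contains_iff, startswith_slice_len value p hs]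
          exact hpw
      · refine Or.inl ?_
        rw [(hmem value).1]
        exact Or.inr ⟨e, he, hx, hv.symm⟩
    · rintro (hc | ⟨L, hL, hc⟩)
      · rw [(hmem value).1] at hc
        rcases hc with hc | ⟨e, he, hx, rfl⟩
        · simp [PySem.Set.empty] at hc
        · exact ⟨e, he, Or.inr ⟨hx, rfl⟩⟩
      · simp only [PySem.Set.mem_ofList, List.mem_map] at hL
        rcases hL with ⟨p0, _, rfl⟩
        rw [pv_contains_iff, (hmem _).2] at hc
        rcases hc with hc | ⟨e, he, hw, heq⟩
        · simp [PySem.Set.empty] at hc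
        · refine ⟨e, he, Or.inl ⟨hw, ?_⟩⟩
          rw [heq]
          exact slice_startswith value _ (Int.natCast_nonneg _)
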